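-- pv_equiv track=rewrite | github.com/jonathanhouge/MRCV | schemes/river.py | legality_check
-- ===== SOURCE A (Python) =====
-- from collections import defaultdict
--
-- def legality_check(
--     directed_graph: defaultdict[int, list[int]], lost: int, won: int
-- ) -> bool:
--     possibleCycle: int = 0
--     for key, values in directed_graph.items():
--         for value in values:
--             if lost == value:
--                 return False
--             elif won == value:
--                 possibleCycle += 1
--         if lost == key:
--             possibleCycle += 1
--
--     if possibleCycle > 2:
--         return False
--     return True
-- ===== SOURCE B (Python) =====
-- def legality_check(directed_graph, lost, won):
--     # Reject first: if `lost` appears anywhere as an edge target, the graph is illegal.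
--     if any(lost in values for values in directed_graph.values()):
--         return False
--     # Otherwise count win-cycle evidence in two closed-form sums.
--     count = sum(values.count(won) for values in directed_graph.values())
--     count += list(directed_graph.keys()).count(lost)
--     return count <= 2
-- ===== Notes on version B (the rewrite author's own statement) =====
-- stated objective: simpler
-- what changed: Replaces the fused loop with early return and a running counter by two declarative passes: an any() rejection of lost-as-value, then a sum of per-list counts of won plus the key count of lost, compared against 2.
import Mathlib
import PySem

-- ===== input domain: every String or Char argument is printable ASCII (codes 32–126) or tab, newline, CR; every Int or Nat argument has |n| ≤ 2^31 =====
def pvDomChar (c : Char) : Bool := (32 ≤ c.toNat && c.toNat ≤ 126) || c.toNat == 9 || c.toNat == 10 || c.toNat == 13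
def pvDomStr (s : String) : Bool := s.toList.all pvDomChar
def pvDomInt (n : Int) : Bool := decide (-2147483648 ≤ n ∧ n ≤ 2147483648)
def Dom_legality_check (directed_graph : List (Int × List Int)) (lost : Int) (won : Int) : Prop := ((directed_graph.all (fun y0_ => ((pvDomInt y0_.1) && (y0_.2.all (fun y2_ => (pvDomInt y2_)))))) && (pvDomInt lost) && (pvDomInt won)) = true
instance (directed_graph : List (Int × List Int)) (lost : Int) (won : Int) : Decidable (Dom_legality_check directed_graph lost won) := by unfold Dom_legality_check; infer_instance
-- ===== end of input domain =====

-- B replaces A's fused loop (early return + running counter) with an any() rejection pass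
-- followed by two closed-form counts; objective: simpler.

-- ===== PORT A =====
-- inner `for value in values` loop: none = the `return False` on lost == value
def legality_check_inner (lost won : Int) (values : List Int) (acc : Int) : Option Int :=
  match values with
  | [] => some acc
  | v :: vs =>
    if lost == v then none
    else if won == v then legality_check_inner lost won vs (acc + 1)
    else legality_check_inner lost won vs acc

-- outer `for key, values in directed_graph.items()` loop
def legality_check_loop (lost won : Int) (g : List (Int × List Int)) (acc : Int) : Bool :=
  match g with
  | [] => if acc > 2 then false else true
  | (k, vs) :: rest =>
    match legality_check_inner lost won vs acc with
    | none => false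
    | some acc' => legality_check_loop lost won rest (if lost == k then acc' + 1 else acc')

def legality_check (directed_graph : List (Int × List Int)) (lost : Int) (won : Int) : Bool :=
  legality_check_loop lost won directed_graph 0

-- ===== PORT B =====
def legality_check_alt (directed_graph : List (Int × List Int)) (lost : Int) (won : Int) : Bool :=
  if directed_graph.any (fun p => p.2.contains lost) then false
  else
    decide ((directed_graph.map (fun p => ((p.2.count won : Nat) : Int))).sum
              + ((directed_graph.map Prod.fst).count lost : Int) ≤ 2)

-- ===== PRECONDITION & SPEC =====
def Spec_legality_check (directed_graph : List (Int × List Int)) (lost : Int) (won : Int) (out : Bool) : Prop := out = legality_check_alt directed_graph lost won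
instance (directed_graph : List (Int × List Int)) (lost : Int) (won : Int) (out : Bool) : Decidable (Spec_legality_check directed_graph lost won out) := by unfold Spec_legality_check; infer_instance

-- ===== CLAIM (what is proved, stated in full; the proofs are below) =====
def Claim_equal_legality_check : Prop := ∀ (directed_graph : List (Int × List Int)) (lost : Int) (won : Int), Dom_legality_check directed_graph lost won → Spec_legality_check directed_graph lost won (legality_check directed_graph lost won)

-- ===== LEMMAS AND PROOFS =====

-- ===== LEMMAS AND PROOFS =====
lemma inner_eq (lost won : Int) (values : List Int) (acc : Int) :
    legality_check_inner lost won values acc =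
      if values.contains lost then none
      else some (acc + ((values.count won : Nat) : Int)) := by
  induction values generalizing acc with
  | nil => simp [legality_check_inner]
  | cons v vs ih =>
    simp only [legality_check_inner, List.contains_cons, List.count_cons, beq_iff_eq]
    rcases eq_or_ne lost v with h | h
    · simp [h]
    · rcases eq_or_ne won v with h2 | h2
      · simp only [if_neg h, if_pos h2, ih]
        by_cases hm : lost ∈ vs
        · have hc : vs.contains lost = true := by simpa using hm
          simp [hm]
        · have hc : vs.contains lost = false := by simpa using hm
          simp only [hc, Bool.or_false, beq_iff_eq, h, Bool.false_eq_true, if_false,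
            Option.some.injEq]
          rw [if_pos h2.symm]
          push_cast
          ring
      · simp [h, h2, Ne.symm h2, ih]

lemma loop_eq (lost won : Int) (g : List (Int × List Int)) (acc : Int) :
    legality_check_loop lost won g acc =
      if g.any (fun p => p.2.contains lost) then false
      else decide (acc + ((g.map (fun p => ((p.2.count won : Nat) : Int))).sum
                    + ((g.map Prod.fst).count lost : Int)) ≤ 2) := by
  induction g generalizing acc with
  | nil =>
    simp only [legality_check_loop, List.any_nil, List.map_nil, List.sum_nil, List.count_nil,
      Bool.false_eq_true, if_false]
    rcases lt_or_ge 2 acc with h | h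
    · rw [if_pos h, eq_comm, decide_eq_false_iff_not]
      omega
    · rw [if_neg (by omega), eq_comm, decide_eq_true_iff]
      omega
  | cons p rest ih =>
    obtain ⟨k, vs⟩ := p
    simp only [legality_check_loop, inner_eq, List.any_cons, List.map_cons, List.sum_cons,
      List.count_cons]
    by_cases hc : vs.contains lost
    · have : lost ∈ vs := by simpa using hc
      simp [this]
    · have hnm : lost ∉ vs := by simpa using hc
      simp only [hc, Bool.false_eq_true, if_false, Bool.false_or]
      rw [ih]
      by_cases hr : rest.any (fun p => p.2.contains lost)
      · have hr' : (rest.any fun p => decide (lost ∈ p.2)) = true := by simpa using hr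
        simp [hr']
      · simp only [hr, Bool.false_eq_true, if_false, decide_eq_decide, beq_iff_eq]
        rcases eq_or_ne lost k with hk | hk
        · simp only [if_pos hk, if_pos hk.symm]
          push_cast
          omega
        · simp only [if_neg hk, if_neg (Ne.symm hk)]
          push_cast
          omega

-- ===== VERDICT (by name: the statement is the Claim_ definition above) =====
theorem legality_check_spec : Claim_equal_legality_check := by
  intro g lost won _
  unfold Spec_legality_check legality_check legality_check_alt
  rw [loop_eq]
  split <;> simp_all
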